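-- pv_equiv track=rewrite | github.com/Code-warlord/CM3070_VSS | reliant_watcher_app/database_manager/db_manager.py | convert_counter_to_message
-- ===== SOURCE A (Python) =====
-- from collections import Counter, defaultdict
--
-- def convert_counter_to_message(objs_counter: Counter):
--     msg = ""
--     if sum(objs_counter.values()) > 0:
--         keys = list(objs_counter.keys())
--         len_of_keys = len(keys)
--         if len_of_keys == 1:
--             msg += f"\n{objs_counter[keys[0]]} {keys[0]} detected in the scene."
--         else:
--             for i in range(len_of_keys):
--                 if i == 0:
--                     msg += f"\n{objs_counter[keys[i]]} {keys[i]}"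
--                 elif i == len_of_keys - 1:
--                     msg += f" and {objs_counter[keys[i]]} {keys[i]} detected in the scene."
--                 else:
--                     msg += f", {objs_counter[keys[i]]} {keys[i]}"
--     return msg
-- ===== SOURCE B (Python) =====
-- def convert_counter_to_message(objs_counter):
--     items = list(objs_counter.items())
--     if sum(c for _, c in items) <= 0:
--         return ""
--     # build the message back-to-front: closing phrase, then items from last to first
--     pieces = [" detected in the scene."]
--     last = True
--     for k, c in reversed(items[1:]):
--         pieces.append(f"{c} {k}")
--         pieces.append(" and " if last else ", ")
--         last = False
--     k0, c0 = items[0]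
--     pieces.append(f"{c0} {k0}")
--     pieces.append("\n")
--     return "".join(reversed(pieces))
-- ===== Notes on version B (the rewrite author's own statement) =====
-- stated objective: alternative
-- what changed: Replaces A's forward positional loop (i==0 / i==len-1 index tests with a per-index dict lookup each iteration) by building the message back-to-front: the closing phrase is laid down first, then the items are walked in reverse with a 'last' flag choosing ' and ' vs ', ', the head fragment and newline are appended, and the collected pieces are joined reversed; no index arithmetic or dict lookups remain.
import Mathlib
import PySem

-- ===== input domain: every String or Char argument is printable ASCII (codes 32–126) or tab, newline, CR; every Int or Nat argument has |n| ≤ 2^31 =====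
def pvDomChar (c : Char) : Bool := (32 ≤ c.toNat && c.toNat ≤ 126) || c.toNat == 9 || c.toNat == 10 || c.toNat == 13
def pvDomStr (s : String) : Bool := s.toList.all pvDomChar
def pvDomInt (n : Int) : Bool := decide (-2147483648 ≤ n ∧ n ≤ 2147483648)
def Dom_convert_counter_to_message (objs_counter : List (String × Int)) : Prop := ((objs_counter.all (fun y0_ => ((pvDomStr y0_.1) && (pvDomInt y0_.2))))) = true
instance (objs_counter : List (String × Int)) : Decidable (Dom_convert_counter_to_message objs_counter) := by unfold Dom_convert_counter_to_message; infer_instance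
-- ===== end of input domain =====

-- B replaces A's forward positional loop (i==0 / i==len-1 index tests with per-index dict
-- lookups) by building the message back-to-front: closing phrase first, items walked in
-- reverse with a 'last' flag choosing " and " vs ", ", then one join of the reversed pieces.


-- ===== PORT A =====
-- dict lookup objs_counter[k], first match; in A, k is always one of the dict's keys,
-- so the `none` (KeyError) branch is unreachable (0 is a placeholder, never returned).
def pyDictGet (d : List (String × Int)) (k : String) : Int :=
  match d.find? (fun p => p.1 == k) with
  | some p => p.2
  | none => 0

def convert_counter_to_message (objs_counter : List (String × Int)) : String :=
  let msg := ""
  if (objs_counter.map (fun p => p.2)).sum > 0 then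
    let keys := objs_counter.map (fun p => p.1)
    let len_of_keys := keys.length
    if len_of_keys = 1 then
      msg ++ "\n" ++ PySem.Int.toStr (pyDictGet objs_counter (keys.getD 0 "")) ++ " " ++ keys.getD 0 "" ++ " detected in the scene."
    else
      (List.range len_of_keys).foldl (fun msg i =>
        if i = 0 then
          msg ++ "\n" ++ PySem.Int.toStr (pyDictGet objs_counter (keys.getD i "")) ++ " " ++ keys.getD i ""
        else if i = len_of_keys - 1 then
          msg ++ " and " ++ PySem.Int.toStr (pyDictGet objs_counter (keys.getD i "")) ++ " " ++ keys.getD i "" ++ " detected in the scene."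
        else
          msg ++ ", " ++ PySem.Int.toStr (pyDictGet objs_counter (keys.getD i "")) ++ " " ++ keys.getD i "") msg
  else msg

-- ===== PORT B =====
def convert_counter_to_message_alt (objs_counter : List (String × Int)) : String :=
  if (objs_counter.map (fun p => p.2)).sum ≤ 0 then ""
  else
    match objs_counter with
    | [] => ""  -- unreachable: an empty counter has value-sum 0
    | (k0, c0) :: rest =>
        -- pieces collected back-to-front; `for k, c in reversed(items[1:])` with a `last` flag
        let st := rest.reverse.foldl
          (fun (st : List String × Bool) kc =>
            (st.1 ++ [PySem.Int.toStr kc.2 ++ " " ++ kc.1, if st.2 then " and " else ", "], false))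
          ([" detected in the scene."], true)
        let pieces := st.1 ++ [PySem.Int.toStr c0 ++ " " ++ k0, "\n"]
        PySem.Str.join "" pieces.reverse

-- ===== PRECONDITION & SPEC =====
-- Pre_ excludes association lists with duplicate keys: a Counter cannot contain a key twice,
-- so such lists do not represent a Counter and any reading of them is accidental.
def Pre_convert_counter_to_message (objs_counter : List (String × Int)) : Prop :=
  (objs_counter.map Prod.fst).Nodup
instance (objs_counter : List (String × Int)) : Decidable (Pre_convert_counter_to_message objs_counter) := by unfold Pre_convert_counter_to_message; infer_instance

def pvWitness_convert_counter_to_message : (List (String × Int)) := [("person", 2), ("car", 1)]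

def Spec_convert_counter_to_message (objs_counter : List (String × Int)) (out : String) : Prop := out = convert_counter_to_message_alt objs_counter
instance (objs_counter : List (String × Int)) (out : String) : Decidable (Spec_convert_counter_to_message objs_counter out) := by unfold Spec_convert_counter_to_message; infer_instance

-- ===== CLAIM (what is proved, stated in full; the proofs are below) =====
def Claim_equal_convert_counter_to_message : Prop := ∀ (objs_counter : List (String × Int)), Dom_convert_counter_to_message objs_counter → Pre_convert_counter_to_message objs_counter → Spec_convert_counter_to_message objs_counter (convert_counter_to_message objs_counter)

-- ===== LEMMAS AND PROOFS =====

-- proof-side characterisation of the fragment B builds for all items after the first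
def rest_fragment : List (String × Int) → String
  | [] => ""
  | [(k, c)] => " and " ++ PySem.Int.toStr c ++ " " ++ k
  | (k, c) :: rest => ", " ++ PySem.Int.toStr c ++ " " ++ k ++ rest_fragment rest

def fmt (p : String × Int) : String := PySem.Int.toStr p.2 ++ " " ++ p.1



lemma chars_join_append (sep x : List Char) (xs : List (List Char)) (h : xs ≠ []) :
    PySem.Chars.join sep (xs ++ [x]) = PySem.Chars.join sep xs ++ sep ++ x := by
  induction xs with
  | nil => simp at h
  | cons a t ih =>
    cases t with
    | nil =>
      simp [PySem.Chars.join_cons_cons, PySem.Chars.join_singleton, List.append_assoc]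
    | cons b t2 =>
      have h2 := ih (by simp)
      simp only [List.cons_append] at h2 ⊢
      rw [PySem.Chars.join_cons_cons, PySem.Chars.join_cons_cons, h2]
      simp [List.append_assoc]

lemma str_join_append (sep x : String) (xs : List String) (h : xs ≠ []) :
    PySem.Str.join sep (xs ++ [x]) = PySem.Str.join sep xs ++ sep ++ x := by
  apply String.toList_inj.mp
  rw [String.toList_append, String.toList_append, PySem.Str.toList_join, PySem.Str.toList_join,
    List.map_append, List.map_singleton]
  exact chars_join_append sep.toList x.toList (xs.map String.toList) (by simpa using h)

lemma str_join_cons (sep a : String) (ys : List String) (h : ys ≠ []) :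
    PySem.Str.join sep (a :: ys) = a ++ sep ++ PySem.Str.join sep ys := by
  cases ys with
  | nil => exact absurd rfl h
  | cons b t =>
    apply String.toList_inj.mp
    rw [String.toList_append, String.toList_append, PySem.Str.toList_join, PySem.Str.toList_join,
      List.map_cons, List.map_cons, PySem.Chars.join_cons_cons]

lemma str_join_nil_cons (a : String) (ys : List String) (h : ys ≠ []) :
    PySem.Str.join "" (a :: ys) = a ++ PySem.Str.join "" ys := by
  rw [str_join_cons "" a ys h]
  simp

lemma str_join_singleton (sep p : String) : PySem.Str.join sep [p] = p := by
  apply String.toList_inj.mp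
  simp [PySem.Str.toList_join, PySem.Chars.join_singleton]

-- the back-to-front accumulator of B's loop computes rest_fragment ++ closing phrase
lemma fold_inv (rest : List (String × Int)) :
    (rest.reverse.foldl
      (fun (st : List String × Bool) kc =>
        (st.1 ++ [PySem.Int.toStr kc.2 ++ " " ++ kc.1, if st.2 then " and " else ", "], false))
      ([" detected in the scene."], true)).1 ≠ []
    ∧ PySem.Str.join "" ((rest.reverse.foldl
      (fun (st : List String × Bool) kc =>
        (st.1 ++ [PySem.Int.toStr kc.2 ++ " " ++ kc.1, if st.2 then " and " else ", "], false))
      ([" detected in the scene."], true)).1.reverse)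
        = rest_fragment rest ++ " detected in the scene."
    ∧ (rest.reverse.foldl
      (fun (st : List String × Bool) kc =>
        (st.1 ++ [PySem.Int.toStr kc.2 ++ " " ++ kc.1, if st.2 then " and " else ", "], false))
      ([" detected in the scene."], true)).2 = rest.isEmpty := by
  induction rest with
  | nil =>
    refine ⟨by simp, ?_, by simp⟩
    simp [rest_fragment, str_join_singleton]
  | cons x rest' ih =>
    obtain ⟨hne, hjoin, hlast⟩ := ih
    rw [List.reverse_cons, List.foldl_append]
    set st' := rest'.reverse.foldl
      (fun (st : List String × Bool) kc =>
        (st.1 ++ [PySem.Int.toStr kc.2 ++ " " ++ kc.1, if st.2 then " and " else ", "], false))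
      ([" detected in the scene."], true) with hst'
    refine ⟨by simp, ?_, by simp⟩
    simp only [List.foldl_cons, List.foldl_nil, List.reverse_append, List.reverse_cons,
      List.reverse_nil, List.nil_append, List.cons_append]
    rw [str_join_nil_cons _ _ (by simp), str_join_nil_cons _ _ (by simpa using hne), hjoin]
    cases rest' with
    | nil =>
      rw [hlast]
      simp [rest_fragment, String.append_assoc]
    | cons y t =>
      rw [hlast]
      simp only [List.isEmpty_cons, if_neg (by simp : ¬((false : Bool) = true))]
      show (", " : String) ++ _ = _
      simp [rest_fragment, String.append_assoc]

lemma alt_nonpos (d : List (String × Int)) (hs : (d.map (fun p => p.2)).sum ≤ 0) :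
    convert_counter_to_message_alt d = "" := by
  unfold convert_counter_to_message_alt
  rw [if_pos hs]

lemma alt_cons (k0 : String) (c0 : Int) (rest : List (String × Int))
    (hs : ((((k0, c0) :: rest).map (fun p => p.2)).sum > 0)) :
    convert_counter_to_message_alt ((k0, c0) :: rest)
      = "\n" ++ (fmt (k0, c0) ++ rest_fragment rest) ++ " detected in the scene." := by
  unfold convert_counter_to_message_alt
  rw [if_neg (by omega)]
  obtain ⟨hne, hjoin, -⟩ := fold_inv rest
  show PySem.Str.join "" (((rest.reverse.foldl
      (fun (st : List String × Bool) kc =>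
        (st.1 ++ [PySem.Int.toStr kc.2 ++ " " ++ kc.1, if st.2 then " and " else ", "], false))
      ([" detected in the scene."], true)).1 ++ [PySem.Int.toStr c0 ++ " " ++ k0, "\n"]).reverse) = _
  rw [List.reverse_append]
  simp only [List.reverse_cons, List.reverse_nil, List.nil_append, List.cons_append]
  rw [str_join_nil_cons _ _ (by simp), str_join_nil_cons _ _ (by simpa using hne), hjoin]
  simp [fmt, String.append_assoc]

lemma pyDictGet_getElem (d : List (String × Int)) (hnd : (d.map Prod.fst).Nodup)
    (i : Nat) (h : i < d.length) : pyDictGet d d[i].1 = d[i].2 := by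
  induction d generalizing i with
  | nil => simp at h
  | cons p tl ih =>
    cases i with
    | zero => simp [pyDictGet]
    | succ j =>
      have hj : j < tl.length := by simpa using h
      have hne : p.1 ≠ tl[j].1 := by
        simp only [List.map_cons, List.nodup_cons] at hnd
        intro he
        exact hnd.1 (he ▸ (List.mem_map.mpr ⟨tl[j], List.getElem_mem hj, rfl⟩))
      have htl := ih (by simpa using hnd.of_cons) j hj
      simp only [List.getElem_cons_succ]
      simp only [pyDictGet, List.find?_cons] at htl ⊢
      rw [show (p.1 == tl[j].1) = false by simpa using hne]
      exact htl

lemma foldl_prefix (parts : List String) (hlen : 2 ≤ parts.length) (k : Nat) (hk1 : 1 ≤ k)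
    (hkn : k ≤ parts.length - 1) :
    (List.range k).foldl (fun msg i =>
        if i = 0 then msg ++ "\n" ++ parts.getD i ""
        else if i = parts.length - 1 then msg ++ " and " ++ parts.getD i "" ++ " detected in the scene."
        else msg ++ ", " ++ parts.getD i "") ""
      = "\n" ++ PySem.Str.join ", " (parts.take k) := by
  induction k with
  | zero => omega
  | succ k ih =>
    by_cases hk0 : k = 0
    · subst hk0
      obtain ⟨p, rest, rfl⟩ : ∃ p rest, parts = p :: rest := by
        cases parts with
        | nil => simp at hlen
        | cons p rest => exact ⟨p, rest, rfl⟩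
      simp [List.range_succ, str_join_singleton]
    · have hk1' : 1 ≤ k := by omega
      have hklt : k < parts.length - 1 := by omega
      rw [List.range_succ, List.foldl_append, ih hk1' (by omega)]
      have hkp : k < parts.length := by omega
      rw [List.take_add_one]
      have hget : parts[k]? = some parts[k] := List.getElem?_eq_getElem hkp
      have hgetD : parts.getD k "" = parts[k] := by simp [List.getD_eq_getElem?_getD, hget]
      simp only [List.foldl_cons, List.foldl_nil, hget, Option.toList_some]
      rw [if_neg hk0, if_neg (by omega), hgetD,
        str_join_append ", " parts[k] (parts.take k) (by
          intro hemp
          have := congrArg List.length hemp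
          simp [Nat.min_eq_left (le_of_lt hkp)] at this
          omega)]
      simp [String.append_assoc]

lemma foldl_full (parts : List String) (hlen : 2 ≤ parts.length) :
    (List.range parts.length).foldl (fun msg i =>
        if i = 0 then msg ++ "\n" ++ parts.getD i ""
        else if i = parts.length - 1 then msg ++ " and " ++ parts.getD i "" ++ " detected in the scene."
        else msg ++ ", " ++ parts.getD i "") ""
      = "\n" ++ PySem.Str.join ", " parts.dropLast ++ " and " ++ parts.getD (parts.length - 1) "" ++ " detected in the scene." := by
  have hsplit : List.range parts.length = List.range (parts.length - 1) ++ [parts.length - 1] := by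
    conv_lhs => rw [show parts.length = (parts.length - 1) + 1 by omega]
    exact List.range_succ
  rw [hsplit, List.foldl_append, foldl_prefix parts hlen (parts.length - 1) (by omega) le_rfl]
  simp only [List.foldl_cons, List.foldl_nil]
  rw [if_neg (by omega), List.dropLast_eq_take]
  simp [String.append_assoc]

-- B's head-fragment-plus-recursion equals A's join-shaped characterisation
lemma fmt_head_tail (rest : List (String × Int)) :
    ∀ (p : String × Int), rest ≠ [] →
    fmt p ++ rest_fragment rest
      = PySem.Str.join ", " (((p :: rest).map fmt).dropLast) ++ " and "
          ++ ((p :: rest).map fmt).getD ((p :: rest).length - 1) "" := by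
  induction rest with
  | nil => intro p h; simp at h
  | cons q rest' ih =>
    intro p _
    cases rest' with
    | nil =>
      simp [rest_fragment, fmt, str_join_singleton, String.append_assoc]
    | cons r t =>
      have hrec := ih q (by simp)
      show fmt p ++ (", " ++ PySem.Int.toStr q.2 ++ " " ++ q.1 ++ rest_fragment (r :: t)) = _
      have hfq : ", " ++ PySem.Int.toStr q.2 ++ " " ++ q.1 ++ rest_fragment (r :: t)
          = ", " ++ (fmt q ++ rest_fragment (r :: t)) := by
        simp [fmt, String.append_assoc]
      rw [hfq, hrec]
      have hdrop : ((p :: q :: r :: t).map fmt).dropLast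
          = fmt p :: ((q :: r :: t).map fmt).dropLast := by
        simp [List.dropLast]
      rw [hdrop, str_join_cons ", " (fmt p) (((q :: r :: t).map fmt).dropLast)
        (by rw [← List.length_pos_iff]; simp)]
      have hlast : ((p :: q :: r :: t).map fmt).getD ((p :: q :: r :: t).length - 1) ""
          = ((q :: r :: t).map fmt).getD ((q :: r :: t).length - 1) "" := by
        simp [List.getD_eq_getElem?_getD]
      rw [hlast]
      simp [String.append_assoc]

-- ===== VERDICT (by name: the statement is the Claim_ definition above) =====
theorem convert_counter_to_message_spec : Claim_equal_convert_counter_to_message := by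
  intro d _hdom hpre
  unfold Spec_convert_counter_to_message convert_counter_to_message
  by_cases hs : (d.map (fun p => p.2)).sum > 0
  · rw [if_pos hs]
    obtain ⟨⟨k0, c0⟩, rest, rfl⟩ : ∃ p rest, d = p :: rest := by
      cases d with
      | nil => simp at hs
      | cons p rest => exact ⟨p, rest, rfl⟩
    rw [alt_cons k0 c0 rest hs]
    cases rest with
    | nil =>
      simp [pyDictGet, rest_fragment, fmt, String.append_assoc]
    | cons q rest' =>
      set d := (k0, c0) :: q :: rest' with hd
      set parts := d.map fmt with hparts
      have hplen : parts.length = d.length := by simp [hparts]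
      rw [if_neg (show ¬(((d.map (fun p => p.1)).length) = 1) from by simp [hd])]
      have hcong := PySem.List.foldl_congr_mem (List.range (d.map (fun p => p.1)).length)
        (fun msg i =>
          if i = 0 then msg ++ "\n" ++ PySem.Int.toStr (pyDictGet d ((d.map (fun p => p.1)).getD i "")) ++ " " ++ (d.map (fun p => p.1)).getD i ""
          else if i = (d.map (fun p => p.1)).length - 1 then msg ++ " and " ++ PySem.Int.toStr (pyDictGet d ((d.map (fun p => p.1)).getD i "")) ++ " " ++ (d.map (fun p => p.1)).getD i "" ++ " detected in the scene."
          else msg ++ ", " ++ PySem.Int.toStr (pyDictGet d ((d.map (fun p => p.1)).getD i "")) ++ " " ++ (d.map (fun p => p.1)).getD i "")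
        (fun msg i =>
          if i = 0 then msg ++ "\n" ++ parts.getD i ""
          else if i = parts.length - 1 then msg ++ " and " ++ parts.getD i "" ++ " detected in the scene."
          else msg ++ ", " ++ parts.getD i "") ""
        (by
          intro msg i hi
          have hi' : i < d.length := by simpa using List.mem_range.mp hi
          simp [hparts, fmt, List.getElem?_map, List.getElem?_eq_getElem hi',
            pyDictGet_getElem d hpre i hi', String.append_assoc])
      rw [hcong, show (d.map (fun p => p.1)).length = parts.length by simp [hplen],
        foldl_full parts (by simp [hplen, hd]),
        fmt_head_tail (q :: rest') (k0, c0) (by simp)]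
      simp [hparts, hd, String.append_assoc]
  · rw [if_neg hs, alt_nonpos d (by omega)]
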